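-- pv_equiv track=rewrite | github.com/rkarikari/stem | docs/adiag/adiag.py | _create_enhanced_summary
-- ===== SOURCE A (Python) =====
-- from typing import Dict, List, Optional
--
-- def _create_enhanced_summary(patient_data: Dict) -> str:
--     """Create enhanced clinical summary with structured format"""
--     summary = []
--
--     # Patient Demographics
--     demo_section = "=== PATIENT DEMOGRAPHICS ==="
--     demo = []
--     for key in ['name', 'age', 'gender', 'phone']:
--         if patient_data.get(key):
--             demo.append(f"{key.upper()}: {patient_data[key]}")
--     if demo:
--         summary.append(demo_section)
--         summary.append("\n".join(demo))
--
--     # Chief Complaint and HPI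
--     if patient_data.get('chief_complaint'):
--         summary.append("\n=== CHIEF COMPLAINT ===")
--         summary.append(patient_data['chief_complaint'])
--
--     # History of Present Illness
--     hpi_items = []
--     if patient_data.get('duration'):
--         hpi_items.append(f"DURATION: {patient_data['duration']}")
--     if patient_data.get('severity'):
--         hpi_items.append(f"SEVERITY: {patient_data['severity']}/10")
--     if patient_data.get('symptoms'):
--         hpi_items.append(f"ASSOCIATED SYMPTOMS: {patient_data['symptoms']}")
--
--     if hpi_items:
--         summary.append("\n=== HISTORY OF PRESENT ILLNESS ===")
--         summary.append("\n".join(hpi_items))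
--
--     # Past Medical History
--     pmh_items = []
--     if patient_data.get('medical_history'):
--         pmh_items.append(f"PAST MEDICAL HISTORY: {patient_data['medical_history']}")
--     if patient_data.get('medications'):
--         pmh_items.append(f"CURRENT MEDICATIONS: {patient_data['medications']}")
--     if patient_data.get('allergies'):
--         pmh_items.append(f"ALLERGIES: {patient_data['allergies']}")
--
--     if pmh_items:
--         summary.append("\n=== PAST MEDICAL HISTORY ===")
--         summary.append("\n".join(pmh_items))
--
--     # Social and Family History
--     social_items = []
--     if patient_data.get('family_history'):
--         social_items.append(f"FAMILY HISTORY: {patient_data['family_history']}")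
--     if patient_data.get('lifestyle'):
--         social_items.append(f"SOCIAL HISTORY: {patient_data['lifestyle']}")
--
--     if social_items:
--         summary.append("\n=== SOCIAL & FAMILY HISTORY ===")
--         summary.append("\n".join(social_items))
--
--     # Additional Information
--     if patient_data.get('additional'):
--         summary.append("\n=== ADDITIONAL INFORMATION ===")
--         summary.append(patient_data['additional'])
--
--     return "\n\n".join(summary)
-- ===== SOURCE B (Python) =====
-- # Scatter/gather re-implementation: one pass over the INPUT entries classifies and
-- # formats each recognised field into an index; a gather stage then emits the sections.
-- FIELD = {
--     'name': ('NAME: ', ''), 'age': ('AGE: ', ''), 'gender': ('GENDER: ', ''),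
--     'phone': ('PHONE: ', ''),
--     'chief_complaint': ('', ''),
--     'duration': ('DURATION: ', ''), 'severity': ('SEVERITY: ', '/10'),
--     'symptoms': ('ASSOCIATED SYMPTOMS: ', ''),
--     'medical_history': ('PAST MEDICAL HISTORY: ', ''),
--     'medications': ('CURRENT MEDICATIONS: ', ''), 'allergies': ('ALLERGIES: ', ''),
--     'family_history': ('FAMILY HISTORY: ', ''), 'lifestyle': ('SOCIAL HISTORY: ', ''),
--     'additional': ('', ''),
-- }
--
-- SECTIONS = [
--     ("=== PATIENT DEMOGRAPHICS ===", ['name', 'age', 'gender', 'phone']),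
--     ("\n=== CHIEF COMPLAINT ===", ['chief_complaint']),
--     ("\n=== HISTORY OF PRESENT ILLNESS ===", ['duration', 'severity', 'symptoms']),
--     ("\n=== PAST MEDICAL HISTORY ===", ['medical_history', 'medications', 'allergies']),
--     ("\n=== SOCIAL & FAMILY HISTORY ===", ['family_history', 'lifestyle']),
--     ("\n=== ADDITIONAL INFORMATION ===", ['additional']),
-- ]
--
-- def _create_enhanced_summary(patient_data):
--     """Create enhanced clinical summary with structured format (scatter/gather)."""
--     # scatter: classify and format each input entry once
--     formatted = {}
--     for key, value in patient_data.items():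
--         if key in FIELD and value:
--             pre, suf = FIELD[key]
--             formatted[key] = f"{pre}{value}{suf}"
--     # gather: emit non-empty sections in order
--     parts = []
--     for header, keys in SECTIONS:
--         lines = [formatted[k] for k in keys if k in formatted]
--         if lines:
--             parts.append(header)
--             parts.append("\n".join(lines))
--     return "\n\n".join(parts)
-- ===== Notes on version B (the rewrite author's own statement) =====
-- stated objective: alternative
-- what changed: Replaced A's spec-driven per-section blocks (which look up fixed keys in the dict and format inline) by a scatter/gather algorithm: one pass over the input's own entries classifies and formats each recognised field into an index dict, and a separate gather stage reads that index to emit the non-empty sections.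
import Mathlib
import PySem

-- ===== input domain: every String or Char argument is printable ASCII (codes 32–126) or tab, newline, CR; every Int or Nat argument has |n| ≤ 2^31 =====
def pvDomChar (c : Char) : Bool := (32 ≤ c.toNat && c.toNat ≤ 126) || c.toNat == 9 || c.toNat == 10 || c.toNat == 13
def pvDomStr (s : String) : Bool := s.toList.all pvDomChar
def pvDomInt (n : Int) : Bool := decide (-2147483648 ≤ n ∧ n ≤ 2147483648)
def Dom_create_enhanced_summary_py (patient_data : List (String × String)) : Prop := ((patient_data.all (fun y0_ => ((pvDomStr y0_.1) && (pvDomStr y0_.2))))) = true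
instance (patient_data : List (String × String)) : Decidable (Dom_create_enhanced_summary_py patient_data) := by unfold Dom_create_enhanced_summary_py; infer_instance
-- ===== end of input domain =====

-- B replaces A's spec-driven per-section blocks by a scatter/gather algorithm: one pass over
-- the input's own entries formats each recognised field into an index dict, then a gather
-- stage emits the non-empty sections (objective: alternative).

-- ===== PORT A =====
-- patient_data.get(key) truthiness: a missing key or "" is falsy, any other string truthy.
def pvGetA (d : PySem.Dict String String) (k : String) : String := (d.get? k).getD ""

def create_enhanced_summary_py (patient_data : List (String × String)) : String :=
  let d := PySem.Dict.ofList patient_data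
  let summary : List String := []
  let demo_section := "=== PATIENT DEMOGRAPHICS ==="
  let demo := ["name", "age", "gender", "phone"].foldl (fun demo key =>
      if pvGetA d key ≠ "" then demo ++ [PySem.Str.upper key ++ ": " ++ pvGetA d key] else demo) []
  let summary := if demo ≠ [] then summary ++ [demo_section, PySem.Str.join "\n" demo] else summary
  let summary := if pvGetA d "chief_complaint" ≠ "" then
      summary ++ ["\n=== CHIEF COMPLAINT ===", pvGetA d "chief_complaint"] else summary
  let hpi_items : List String := []
  let hpi_items := if pvGetA d "duration" ≠ "" then hpi_items ++ ["DURATION: " ++ pvGetA d "duration"] else hpi_items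
  let hpi_items := if pvGetA d "severity" ≠ "" then hpi_items ++ ["SEVERITY: " ++ pvGetA d "severity" ++ "/10"] else hpi_items
  let hpi_items := if pvGetA d "symptoms" ≠ "" then hpi_items ++ ["ASSOCIATED SYMPTOMS: " ++ pvGetA d "symptoms"] else hpi_items
  let summary := if hpi_items ≠ [] then
      summary ++ ["\n=== HISTORY OF PRESENT ILLNESS ===", PySem.Str.join "\n" hpi_items] else summary
  let pmh_items : List String := []
  let pmh_items := if pvGetA d "medical_history" ≠ "" then pmh_items ++ ["PAST MEDICAL HISTORY: " ++ pvGetA d "medical_history"] else pmh_items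
  let pmh_items := if pvGetA d "medications" ≠ "" then pmh_items ++ ["CURRENT MEDICATIONS: " ++ pvGetA d "medications"] else pmh_items
  let pmh_items := if pvGetA d "allergies" ≠ "" then pmh_items ++ ["ALLERGIES: " ++ pvGetA d "allergies"] else pmh_items
  let summary := if pmh_items ≠ [] then
      summary ++ ["\n=== PAST MEDICAL HISTORY ===", PySem.Str.join "\n" pmh_items] else summary
  let social_items : List String := []
  let social_items := if pvGetA d "family_history" ≠ "" then social_items ++ ["FAMILY HISTORY: " ++ pvGetA d "family_history"] else social_items
  let social_items := if pvGetA d "lifestyle" ≠ "" then social_items ++ ["SOCIAL HISTORY: " ++ pvGetA d "lifestyle"] else social_items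
  let summary := if social_items ≠ [] then
      summary ++ ["\n=== SOCIAL & FAMILY HISTORY ===", PySem.Str.join "\n" social_items] else summary
  let summary := if pvGetA d "additional" ≠ "" then
      summary ++ ["\n=== ADDITIONAL INFORMATION ===", pvGetA d "additional"] else summary
  PySem.Str.join "\n\n" summary

-- ===== PORT B =====
-- FIELD: key -> (prefix, suffix) of its formatted line.
def pvFIELD : PySem.Dict String (String × String) := PySem.Dict.ofList
  [("name", ("NAME: ", "")), ("age", ("AGE: ", "")), ("gender", ("GENDER: ", "")),
   ("phone", ("PHONE: ", "")),
   ("chief_complaint", ("", "")),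
   ("duration", ("DURATION: ", "")), ("severity", ("SEVERITY: ", "/10")),
   ("symptoms", ("ASSOCIATED SYMPTOMS: ", "")),
   ("medical_history", ("PAST MEDICAL HISTORY: ", "")),
   ("medications", ("CURRENT MEDICATIONS: ", "")), ("allergies", ("ALLERGIES: ", "")),
   ("family_history", ("FAMILY HISTORY: ", "")), ("lifestyle", ("SOCIAL HISTORY: ", "")),
   ("additional", ("", ""))]

-- SECTIONS: header and the keys gathered under it.
def pvSECTIONS : List (String × List String) :=
  [("=== PATIENT DEMOGRAPHICS ===", ["name", "age", "gender", "phone"]),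
   ("\n=== CHIEF COMPLAINT ===", ["chief_complaint"]),
   ("\n=== HISTORY OF PRESENT ILLNESS ===", ["duration", "severity", "symptoms"]),
   ("\n=== PAST MEDICAL HISTORY ===", ["medical_history", "medications", "allergies"]),
   ("\n=== SOCIAL & FAMILY HISTORY ===", ["family_history", "lifestyle"]),
   ("\n=== ADDITIONAL INFORMATION ===", ["additional"])]

-- scatter step: `if key in FIELD and value: formatted[key] = pre + value + suf`
def pvScatterStep (f : PySem.Dict String String) (kv : String × String) : PySem.Dict String String :=
  match pvFIELD.get? kv.1 with
  | some ps => if kv.2 ≠ "" then f.insert kv.1 (ps.1 ++ kv.2 ++ ps.2) else f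
  | none => f

def create_enhanced_summary_py_alt (patient_data : List (String × String)) : String :=
  let d := PySem.Dict.ofList patient_data
  -- scatter: classify and format each input entry once
  let formatted := d.items.foldl pvScatterStep PySem.Dict.empty
  -- gather: emit non-empty sections in order
  let parts := pvSECTIONS.foldl (fun (acc : List String) sec =>
      let lines := sec.2.filterMap (fun k => formatted.get? k)
      if lines ≠ [] then acc ++ [sec.1, PySem.Str.join "\n" lines] else acc) ([] : List String)
  PySem.Str.join "\n\n" parts

-- ===== PRECONDITION & SPEC =====
def Spec_create_enhanced_summary_py (patient_data : List (String × String)) (out : String) : Prop := out = create_enhanced_summary_py_alt patient_data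
instance (patient_data : List (String × String)) (out : String) : Decidable (Spec_create_enhanced_summary_py patient_data out) := by unfold Spec_create_enhanced_summary_py; infer_instance

-- ===== CLAIM (what is proved, stated in full; the proofs are below) =====
def Claim_equal_create_enhanced_summary_py : Prop := ∀ (patient_data : List (String × String)), Dom_create_enhanced_summary_py patient_data → Spec_create_enhanced_summary_py patient_data (create_enhanced_summary_py patient_data)

-- ===== LEMMAS AND PROOFS =====
-- Proof helpers: the common section-chain shape, plus A's section lists factored out.
def pvStep (hdr : String) (lines acc : List String) : List String :=
  if lines ≠ [] then acc ++ [hdr, PySem.Str.join "\n" lines] else acc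

def pvDemoA (g : String → String) : List String :=
  ["name", "age", "gender", "phone"].foldl (fun demo key =>
    if g key ≠ "" then demo ++ [PySem.Str.upper key ++ ": " ++ g key] else demo) []

def pvHpiA (g : String → String) : List String :=
  let i0 : List String := []
  let i1 := if g "duration" ≠ "" then i0 ++ ["DURATION: " ++ g "duration"] else i0
  let i2 := if g "severity" ≠ "" then i1 ++ ["SEVERITY: " ++ g "severity" ++ "/10"] else i1
  if g "symptoms" ≠ "" then i2 ++ ["ASSOCIATED SYMPTOMS: " ++ g "symptoms"] else i2

def pvPmhA (g : String → String) : List String :=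
  let i0 : List String := []
  let i1 := if g "medical_history" ≠ "" then i0 ++ ["PAST MEDICAL HISTORY: " ++ g "medical_history"] else i0
  let i2 := if g "medications" ≠ "" then i1 ++ ["CURRENT MEDICATIONS: " ++ g "medications"] else i1
  if g "allergies" ≠ "" then i2 ++ ["ALLERGIES: " ++ g "allergies"] else i2

def pvSocialA (g : String → String) : List String :=
  let i0 : List String := []
  let i1 := if g "family_history" ≠ "" then i0 ++ ["FAMILY HISTORY: " ++ g "family_history"] else i0
  if g "lifestyle" ≠ "" then i1 ++ ["SOCIAL HISTORY: " ++ g "lifestyle"] else i1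

theorem pv_lit_append (a b c v : String) (h : a ++ b = c) : a ++ b ++ v = c ++ v := by
  rw [h]

theorem pv_name (v : String) : PySem.Str.upper "name" ++ ": " ++ v = "NAME: " ++ v :=
  pv_lit_append _ _ _ _ (by decide)
theorem pv_age (v : String) : PySem.Str.upper "age" ++ ": " ++ v = "AGE: " ++ v :=
  pv_lit_append _ _ _ _ (by decide)
theorem pv_gender (v : String) : PySem.Str.upper "gender" ++ ": " ++ v = "GENDER: " ++ v :=
  pv_lit_append _ _ _ _ (by decide)
theorem pv_phone (v : String) : PySem.Str.upper "phone" ++ ": " ++ v = "PHONE: " ++ v :=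
  pv_lit_append _ _ _ _ (by decide)

theorem pv_join_single (v : String) : PySem.Str.join "\n" [v] = v := by
  simp [PySem.Str.join, PySem.Chars.join, List.intercalate]

-- A's raw single-value sections are pvStep on a singleton list.
theorem pv_chief (hdr v : String) (acc : List String) :
    (if v ≠ "" then acc ++ [hdr, v] else acc) = pvStep hdr (if v ≠ "" then [v] else []) acc := by
  by_cases h : v = "" <;> simp [pvStep, h, pv_join_single]

-- The scatter fold's lookup: for an items list with distinct keys, the built index at q
-- is determined by the dict lookup of q and the FIELD table.
theorem pv_scatter_get (its : List (String × String)) (f0 : PySem.Dict String String)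
    (q : String) (hnd : (its.map Prod.fst).Nodup) :
    (its.foldl pvScatterStep f0).get? q =
      match (PySem.Dict.mk its).get? q with
      | some v =>
          (match pvFIELD.get? q with
           | some ps => if v ≠ "" then some (ps.1 ++ v ++ ps.2) else f0.get? q
           | none => f0.get? q)
      | none => f0.get? q := by
  induction its generalizing f0 with
  | nil =>
      have : (PySem.Dict.mk ([] : List (String × String))).get? q = none := rfl
      simp [this]
  | cons kv rest ih =>
      obtain ⟨k, v⟩ := kv
      simp only [List.map_cons, List.nodup_cons] at hnd
      obtain ⟨hk, hrest⟩ := hnd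
      rw [List.foldl_cons, ih _ hrest]
      by_cases hq : q = k
      · subst hq
        have hnone : (PySem.Dict.mk rest).get? q = none := by
          rw [PySem.Dict.get?_eq_none_iff_not_mem_keys]
          simpa [PySem.Dict.keys] using hk
        rw [hnone]
        have hcons : (PySem.Dict.mk ((q, v) :: rest)).get? q = some v := by
          simp [PySem.Dict.get?_mk_cons]
        rw [hcons]
        simp only [pvScatterStep]
        cases hf : pvFIELD.get? q with
        | none => rfl
        | some ps =>
            by_cases hv : v = "" <;>
              simp [hv, PySem.Dict.get?_insert_self]
      · have hcons : (PySem.Dict.mk ((k, v) :: rest)).get? q = (PySem.Dict.mk rest).get? q := by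
          simp [PySem.Dict.get?_mk_cons, (by simpa using Ne.symm hq : (k == q) = false)]
        rw [hcons]
        have hstep : (pvScatterStep f0 (k, v)).get? q = f0.get? q := by
          simp only [pvScatterStep]
          cases hf : pvFIELD.get? k with
          | none => rfl
          | some ps =>
              by_cases hv : v = "" <;> simp [hv, PySem.Dict.get?_insert_of_ne _ _ hq]
        rw [hstep]

def pvScatter (pd : List (String × String)) : PySem.Dict String String :=
  (PySem.Dict.ofList pd).items.foldl pvScatterStep PySem.Dict.empty

-- At a key FIELD recognises, the index holds pre+value+suf exactly when the value is truthy.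
theorem pv_fmt (pd : List (String × String)) (k pre suf : String)
    (hf : pvFIELD.get? k = some (pre, suf)) :
    (pvScatter pd).get? k =
      (if pvGetA (PySem.Dict.ofList pd) k ≠ "" then
        some (pre ++ pvGetA (PySem.Dict.ofList pd) k ++ suf) else none) := by
  set d := PySem.Dict.ofList pd with hd
  have hmk : PySem.Dict.mk d.items = d := rfl
  have hnd : (d.items.map Prod.fst).Nodup := by
    have := PySem.Dict.nodup_keys_ofList (κ := String) (ν := String) pd
    simpa [hd, PySem.Dict.keys] using this
  rw [pvScatter, ← hd, pv_scatter_get _ _ _ hnd, hmk]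
  cases hg : d.get? k with
  | none => simp [pvGetA, hg, PySem.Dict.get?_empty]
  | some v =>
      by_cases hv : v = "" <;> simp [pvGetA, hg, hf, hv, PySem.Dict.get?_empty]

-- Each section's gathered lines coincide with A's hand-built list.
theorem pv_gather_demo (pd : List (String × String)) :
    (["name", "age", "gender", "phone"].filterMap (fun k => (pvScatter pd).get? k))
      = pvDemoA (pvGetA (PySem.Dict.ofList pd)) := by
  set g := pvGetA (PySem.Dict.ofList pd)
  rw [show (["name", "age", "gender", "phone"].filterMap (fun k => (pvScatter pd).get? k))
      = [(pvScatter pd).get? "name", (pvScatter pd).get? "age",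
         (pvScatter pd).get? "gender", (pvScatter pd).get? "phone"].filterMap id by
        simp [List.filterMap]]
  rw [pv_fmt pd "name" "NAME: " "" rfl, pv_fmt pd "age" "AGE: " "" rfl,
      pv_fmt pd "gender" "GENDER: " "" rfl, pv_fmt pd "phone" "PHONE: " "" rfl]
  by_cases h1 : g "name" = "" <;> by_cases h2 : g "age" = "" <;>
    by_cases h3 : g "gender" = "" <;> by_cases h4 : g "phone" = "" <;>
    simp [pvDemoA, g, h1, h2, h3, h4, pv_name, pv_age, pv_gender, pv_phone]

theorem pv_gather_one (pd : List (String × String)) (k : String)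
    (hf : pvFIELD.get? k = some ("", "")) :
    ([k].filterMap (fun k => (pvScatter pd).get? k))
      = (if pvGetA (PySem.Dict.ofList pd) k ≠ "" then [pvGetA (PySem.Dict.ofList pd) k] else []) := by
  rw [show ([k].filterMap (fun k => (pvScatter pd).get? k))
      = [(pvScatter pd).get? k].filterMap id by simp [List.filterMap]]
  rw [pv_fmt pd k "" "" hf]
  by_cases h : pvGetA (PySem.Dict.ofList pd) k = "" <;> simp [h]

theorem pv_gather_hpi (pd : List (String × String)) :
    (["duration", "severity", "symptoms"].filterMap (fun k => (pvScatter pd).get? k))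
      = pvHpiA (pvGetA (PySem.Dict.ofList pd)) := by
  set g := pvGetA (PySem.Dict.ofList pd)
  rw [show (["duration", "severity", "symptoms"].filterMap (fun k => (pvScatter pd).get? k))
      = [(pvScatter pd).get? "duration", (pvScatter pd).get? "severity",
         (pvScatter pd).get? "symptoms"].filterMap id by simp [List.filterMap]]
  rw [pv_fmt pd "duration" "DURATION: " "" rfl, pv_fmt pd "severity" "SEVERITY: " "/10" rfl,
      pv_fmt pd "symptoms" "ASSOCIATED SYMPTOMS: " "" rfl]
  by_cases h1 : g "duration" = "" <;> by_cases h2 : g "severity" = "" <;>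
    by_cases h3 : g "symptoms" = "" <;> simp [pvHpiA, g, h1, h2, h3]

theorem pv_gather_pmh (pd : List (String × String)) :
    (["medical_history", "medications", "allergies"].filterMap (fun k => (pvScatter pd).get? k))
      = pvPmhA (pvGetA (PySem.Dict.ofList pd)) := by
  set g := pvGetA (PySem.Dict.ofList pd)
  rw [show (["medical_history", "medications", "allergies"].filterMap (fun k => (pvScatter pd).get? k))
      = [(pvScatter pd).get? "medical_history", (pvScatter pd).get? "medications",
         (pvScatter pd).get? "allergies"].filterMap id by simp [List.filterMap]]
  rw [pv_fmt pd "medical_history" "PAST MEDICAL HISTORY: " "" rfl,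
      pv_fmt pd "medications" "CURRENT MEDICATIONS: " "" rfl,
      pv_fmt pd "allergies" "ALLERGIES: " "" rfl]
  by_cases h1 : g "medical_history" = "" <;> by_cases h2 : g "medications" = "" <;>
    by_cases h3 : g "allergies" = "" <;> simp [pvPmhA, g, h1, h2, h3]

theorem pv_gather_social (pd : List (String × String)) :
    (["family_history", "lifestyle"].filterMap (fun k => (pvScatter pd).get? k))
      = pvSocialA (pvGetA (PySem.Dict.ofList pd)) := by
  set g := pvGetA (PySem.Dict.ofList pd)
  rw [show (["family_history", "lifestyle"].filterMap (fun k => (pvScatter pd).get? k))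
      = [(pvScatter pd).get? "family_history", (pvScatter pd).get? "lifestyle"].filterMap id by
        simp [List.filterMap]]
  rw [pv_fmt pd "family_history" "FAMILY HISTORY: " "" rfl,
      pv_fmt pd "lifestyle" "SOCIAL HISTORY: " "" rfl]
  by_cases h1 : g "family_history" = "" <;> by_cases h2 : g "lifestyle" = "" <;>
    simp [pvSocialA, g, h1, h2]

-- ===== VERDICT (by name: the statement is the Claim_ definition above) =====
theorem create_enhanced_summary_py_spec : Claim_equal_create_enhanced_summary_py := by
  intro pd _
  show create_enhanced_summary_py pd = create_enhanced_summary_py_alt pd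
  have hA : create_enhanced_summary_py pd = (
      let g : String → String := pvGetA (PySem.Dict.ofList pd);
      let s1 := pvStep "=== PATIENT DEMOGRAPHICS ===" (pvDemoA g) [];
      let s2 := if g "chief_complaint" ≠ "" then s1 ++ ["\n=== CHIEF COMPLAINT ===", g "chief_complaint"] else s1;
      let s3 := pvStep "\n=== HISTORY OF PRESENT ILLNESS ===" (pvHpiA g) s2;
      let s4 := pvStep "\n=== PAST MEDICAL HISTORY ===" (pvPmhA g) s3;
      let s5 := pvStep "\n=== SOCIAL & FAMILY HISTORY ===" (pvSocialA g) s4;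
      let s6 := if g "additional" ≠ "" then s5 ++ ["\n=== ADDITIONAL INFORMATION ===", g "additional"] else s5;
      PySem.Str.join "\n\n" s6) := rfl
  have hB : create_enhanced_summary_py_alt pd = (
      PySem.Str.join "\n\n"
        (pvStep "\n=== ADDITIONAL INFORMATION ===" (["additional"].filterMap (fun k => (pvScatter pd).get? k))
          (pvStep "\n=== SOCIAL & FAMILY HISTORY ===" (["family_history", "lifestyle"].filterMap (fun k => (pvScatter pd).get? k))
            (pvStep "\n=== PAST MEDICAL HISTORY ===" (["medical_history", "medications", "allergies"].filterMap (fun k => (pvScatter pd).get? k))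
              (pvStep "\n=== HISTORY OF PRESENT ILLNESS ===" (["duration", "severity", "symptoms"].filterMap (fun k => (pvScatter pd).get? k))
                (pvStep "\n=== CHIEF COMPLAINT ===" (["chief_complaint"].filterMap (fun k => (pvScatter pd).get? k))
                  (pvStep "=== PATIENT DEMOGRAPHICS ===" (["name", "age", "gender", "phone"].filterMap (fun k => (pvScatter pd).get? k)) []))))))) := rfl
  rw [hA, hB]
  rw [pv_gather_demo, pv_gather_one pd "chief_complaint" rfl, pv_gather_hpi, pv_gather_pmh,
      pv_gather_social, pv_gather_one pd "additional" rfl]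
  simp only [pv_chief]
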